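-- pv_equiv track=rewrite | github.com/andri27-ts/GoldTrackML | merging_tracks.py | number_hits_different_module
-- ===== SOURCE A (Python) =====
-- def number_hits_different_module(labels, vlm_predicted):
--     '''
--     Calculate for each hit, the number of hits in its track that belong to a different volume and layer id
--
--     labels - list of track id for each hit
--     vlm_predicted - predicted volume&layer for each hit
--     '''
--
--     real_N = {}
--     assert(len(labels) == len(vlm_predicted))
--     for idx, (l,vlm_p) in enumerate(zip(labels, vlm_predicted)):
--         if l in real_N:
--             real_N[l].add(vlm_p)
--         else:
--             real_N[l] = set([vlm_p])
--
--     return [len(real_N[x]) for x in labels]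
-- ===== SOURCE B (Python) =====
-- def number_hits_different_module(labels, vlm_predicted):
--     '''
--     Calculate for each hit, the number of hits in its track that belong to a different volume and layer id
--     '''
--     assert(len(labels) == len(vlm_predicted))
--     # sort-then-scan: sort the (track, volume&layer) pairs lexicographically, so equal
--     # pairs become adjacent; one linear scan counts each run head once per track.
--     pairs = sorted(zip(labels, vlm_predicted))
--     counts = {}
--     prev = None
--     for p in pairs:
--         if p != prev:
--             counts[p[0]] = counts.get(p[0], 0) + 1
--         prev = p
--     return [counts[x] for x in labels]
-- ===== Notes on version B (the rewrite author's own statement) =====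
-- stated objective: alternative
-- what changed: Replaces A's one-pass hash dict of per-track sets with a sort-then-scan algorithm: lexicographically sort the (track, volume&layer) pairs so duplicates are adjacent, then a single linear scan counts each run head into a per-track tally, emitted in original hit order.
import Mathlib
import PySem

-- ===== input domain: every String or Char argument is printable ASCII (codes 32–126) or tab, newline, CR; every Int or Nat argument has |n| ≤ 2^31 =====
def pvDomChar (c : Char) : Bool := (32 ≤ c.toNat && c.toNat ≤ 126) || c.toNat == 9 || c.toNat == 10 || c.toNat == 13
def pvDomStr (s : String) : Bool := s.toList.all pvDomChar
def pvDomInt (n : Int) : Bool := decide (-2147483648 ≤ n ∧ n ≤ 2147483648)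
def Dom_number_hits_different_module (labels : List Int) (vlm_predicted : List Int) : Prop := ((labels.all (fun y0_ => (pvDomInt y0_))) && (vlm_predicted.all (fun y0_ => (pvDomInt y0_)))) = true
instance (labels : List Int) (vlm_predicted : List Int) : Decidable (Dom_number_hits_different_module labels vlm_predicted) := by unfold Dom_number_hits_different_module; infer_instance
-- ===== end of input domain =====

-- B replaces A's one-pass hash dict of per-track sets with sort-then-scan:
-- sort the (track, vlm) pairs so duplicates are adjacent, then one linear scan
-- tallies each run head per track (objective: alternative algorithm).

-- ===== PORT A =====
-- the loop body of A: grow the per-track set, or start a fresh singleton set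
def pvStepA (d : PySem.Dict Int (PySem.Set Int)) (p : Int × Int) : PySem.Dict Int (PySem.Set Int) :=
  if d.contains p.1 then d.insert p.1 (PySem.Set.add (d.getD p.1 PySem.Set.empty) p.2)
  else d.insert p.1 (PySem.Set.ofList [p.2])

def number_hits_different_module (labels : List Int) (vlm_predicted : List Int) : List Int :=
  let real_N := (labels.zip vlm_predicted).foldl pvStepA PySem.Dict.empty
  -- real_N[x]: under Pre_ every x ∈ labels is a key, so the default is never used
  labels.map (fun x => PySem.Set.len (real_N.getD x PySem.Set.empty))

-- ===== PORT B =====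
-- B's loop: walk the sorted pairs; at each run head (p != prev) bump the tally
-- of its track; prev is updated to p every step
def pvScanB (prev : Option (Int × Int)) (d : PySem.Dict Int Int) : List (Int × Int) → PySem.Dict Int Int
  | [] => d
  | p :: rest =>
      pvScanB (some p) (if some p ≠ prev then d.insert p.1 (d.getD p.1 0 + 1) else d) rest

def number_hits_different_module_alt (labels : List Int) (vlm_predicted : List Int) : List Int :=
  let pairs := PySem.List.sorted2 (labels.zip vlm_predicted) Prod.fst Prod.snd
  let counts := pvScanB none PySem.Dict.empty pairs
  -- counts[x]: under Pre_ every x ∈ labels heads some run, so the default is never used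
  labels.map (fun x => counts.getD x 0)

-- ===== PRECONDITION & SPEC =====
-- Pre_ excludes unequal-length inputs, on which A's assert raises AssertionError.
def Pre_number_hits_different_module (labels : List Int) (vlm_predicted : List Int) : Prop :=
  labels.length = vlm_predicted.length
instance (labels : List Int) (vlm_predicted : List Int) : Decidable (Pre_number_hits_different_module labels vlm_predicted) := by unfold Pre_number_hits_different_module; infer_instance

def pvWitness_number_hits_different_module : List Int × List Int := ([1, 1, 2, 1], [5, 6, 5, 5])

def Spec_number_hits_different_module (labels : List Int) (vlm_predicted : List Int) (out : List Int) : Prop := out = number_hits_different_module_alt labels vlm_predicted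
instance (labels : List Int) (vlm_predicted : List Int) (out : List Int) : Decidable (Spec_number_hits_different_module labels vlm_predicted out) := by unfold Spec_number_hits_different_module; infer_instance

-- ===== CLAIM (what is proved, stated in full; the proofs are below) =====
def Claim_equal_number_hits_different_module : Prop := ∀ (labels : List Int) (vlm_predicted : List Int), Dom_number_hits_different_module labels vlm_predicted → Pre_number_hits_different_module labels vlm_predicted → Spec_number_hits_different_module labels vlm_predicted (number_hits_different_module labels vlm_predicted)

-- ===== LEMMAS AND PROOFS =====

-- -------- A side: characterise A's dict of per-track sets --------
theorem pv_ofList_append_singleton {a : Type} [BEq a] (xs : List a) (p : a) :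
    PySem.Set.ofList (xs ++ [p]) = PySem.Set.add (PySem.Set.ofList xs) p := by
  simp [PySem.Set.ofList_eq_foldl]

theorem pv_foldA_get? (ps : List (Int × Int)) (x : Int) :
    (ps.foldl pvStepA PySem.Dict.empty).get? x =
      if x ∈ ps.map Prod.fst
      then some (PySem.Set.ofList ((ps.filter (fun p => p.1 == x)).map Prod.snd))
      else none := by
  induction ps using List.reverseRecOn generalizing x with
  | nil => simp [PySem.Dict.get?_empty]
  | append_singleton ps p ih =>
    rw [List.foldl_append, List.foldl_cons, List.foldl_nil]
    have ih1 := ih p.1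
    have ih2 := ih x
    by_cases hc : p.1 ∈ ps.map Prod.fst
    · have hcon : (ps.foldl pvStepA PySem.Dict.empty).contains p.1 = true := by
        by_contra hne
        have h0 := (PySem.Dict.get?_eq_none_iff_contains (ps.foldl pvStepA PySem.Dict.empty) p.1).mpr
          (by simpa using hne)
        rw [ih1, if_pos hc] at h0
        simp at h0
      have hget : (ps.foldl pvStepA PySem.Dict.empty).getD p.1 PySem.Set.empty
          = PySem.Set.ofList ((ps.filter (fun q => q.1 == p.1)).map Prod.snd) := by
        exact PySem.Dict.getD_of_get?_eq_some _ _ (by rw [ih1, if_pos hc])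
      simp only [pvStepA, hcon, if_pos, hget]
      rw [PySem.Dict.get?_insert]
      by_cases hx : x = p.1
      · subst hx
        rw [if_pos rfl, if_pos (by simp), List.filter_append, List.map_append]
        simp only [List.filter_cons, List.filter_nil, BEq.rfl, if_pos, List.map_cons, List.map_nil]
        rw [pv_ofList_append_singleton]
      · rw [if_neg hx, ih2, List.filter_append]
        have hfp : (List.filter (fun q => q.1 == x) [p]) = [] := by
          simp [Ne.symm hx]
        rw [hfp, List.append_nil]
        by_cases hm : x ∈ List.map Prod.fst ps
        · simp [List.map_append, hm]
        · simp [List.map_append, hm, hx]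
    · have hcon : (ps.foldl pvStepA PySem.Dict.empty).contains p.1 = false := by
        exact (PySem.Dict.get?_eq_none_iff_contains (ps.foldl pvStepA PySem.Dict.empty) p.1).mp
          (by rw [ih1, if_neg hc])
      simp only [pvStepA, hcon, Bool.false_eq_true, if_false]
      rw [PySem.Dict.get?_insert]
      by_cases hx : x = p.1
      · subst hx
        have hfn : ps.filter (fun q => q.1 == p.1) = [] := by
          rw [List.filter_eq_nil_iff]
          intro q hq hb
          exact hc (List.mem_map.mpr ⟨q, hq, by simpa using hb⟩)
        rw [if_pos rfl, if_pos (by simp), List.filter_append, hfn]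
        simp
      · rw [if_neg hx, ih2, List.filter_append]
        have hfp : (List.filter (fun q => q.1 == x) [p]) = [] := by
          simp [Ne.symm hx]
        rw [hfp, List.append_nil]
        by_cases hm : x ∈ List.map Prod.fst ps
        · simp [List.map_append, hm]
        · simp [List.map_append, hm, hx]

-- # distinct vlm values of track x = # distinct pairs whose track is x
theorem pv_count_bridge (ps : List (Int × Int)) (x : Int) :
    (PySem.Set.ofList ((ps.filter (fun p => p.1 == x)).map Prod.snd)).length =
      ((PySem.Set.ofList ps).map Prod.fst).count x := by
  induction ps using List.reverseRecOn with
  | nil => simp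
  | append_singleton ps p ih =>
    obtain ⟨a, b⟩ := p
    rw [List.filter_append, pv_ofList_append_singleton]
    by_cases hmem : (a, b) ∈ ps
    · rw [PySem.Set.add_of_mem ((PySem.Set.mem_ofList ps (a, b)).mpr hmem)]
      by_cases ha : a = x
      · subst ha
        have hf : List.filter (fun q => q.1 == a) [(a, b)] = [(a, b)] := by simp
        rw [hf, List.map_append]
        have hb : b ∈ (ps.filter (fun q => q.1 == a)).map Prod.snd :=
          List.mem_map.mpr ⟨(a, b), List.mem_filter.mpr ⟨hmem, by simp⟩, rfl⟩
        rw [show List.map Prod.snd [(a, b)] = [b] from rfl, pv_ofList_append_singleton,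
          PySem.Set.add_of_mem ((PySem.Set.mem_ofList _ b).mpr hb)]
        exact ih
      · have hf : List.filter (fun q => q.1 == x) [(a, b)] = [] := by simp [ha]
        rw [hf, List.append_nil]
        exact ih
    · rw [PySem.Set.add_of_not_mem (fun hin => hmem ((PySem.Set.mem_ofList ps (a, b)).mp hin))]
      simp only [List.map_append, List.count_append]
      by_cases ha : a = x
      · subst ha
        have hf : List.filter (fun q => q.1 == a) [(a, b)] = [(a, b)] := by simp
        rw [hf]
        have hb : b ∉ (ps.filter (fun q => q.1 == a)).map Prod.snd := by
          intro hb
          obtain ⟨q, hq, hq2⟩ := List.mem_map.mp hb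
          obtain ⟨hq1, hqa⟩ := List.mem_filter.mp hq
          have : q = (a, b) := by
            obtain ⟨q1, q2⟩ := q
            simp at hqa hq2
            simp [hqa, hq2]
          exact hmem (this ▸ hq1)
        rw [show List.map Prod.snd [(a, b)] = [b] from rfl, pv_ofList_append_singleton,
          PySem.Set.add_of_not_mem (fun hin => hb ((PySem.Set.mem_ofList _ b).mp hin))]
        simp [List.length_append, ih]
      · have hf : List.filter (fun q => q.1 == x) [(a, b)] = [] := by simp [ha]
        rw [hf]
        simp [ha, ih]

-- -------- B side: order of the sorted list, its run heads, the tally --------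

-- lexicographic ≤ on Int pairs, and the strict 'before' test sorted2 sorts by
def pvLe (a b : Int × Int) : Prop := a.1 < b.1 ∨ (a.1 = b.1 ∧ a.2 ≤ b.2)

def pvBefore (a b : Int × Int) : Bool :=
  decide (a.1 < b.1) || (!decide (b.1 < a.1) && decide (a.2 < b.2))

theorem pvBefore_false_iff (a b : Int × Int) : pvBefore b a = false ↔ pvLe a b := by
  simp [pvBefore, pvLe]; omega

theorem pv_insertBy_pairwise (x : Int × Int) (ys : List (Int × Int))
    (h : ys.Pairwise pvLe) :
    (PySem.List.insertBy pvBefore x ys).Pairwise pvLe := by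
  induction ys with
  | nil => simp [PySem.List.insertBy]
  | cons y ys ih =>
    rw [List.pairwise_cons] at h
    obtain ⟨hy, hys⟩ := h
    by_cases hb : pvBefore x y = true
    · rw [show PySem.List.insertBy pvBefore x (y :: ys) = x :: y :: ys by
        simp [PySem.List.insertBy, hb]]
      refine List.Pairwise.cons ?_ (List.Pairwise.cons hy hys)
      intro z hz
      rcases List.mem_cons.mp hz with hz | hz
      · subst hz
        obtain ⟨x1, x2⟩ := x; obtain ⟨z1, z2⟩ := z
        simp [pvBefore] at hb
        simp [pvLe]; omega
      · have h1 : pvLe y z := hy z hz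
        obtain ⟨x1, x2⟩ := x; obtain ⟨y1, y2⟩ := y; obtain ⟨z1, z2⟩ := z
        simp [pvBefore] at hb
        simp [pvLe] at h1 ⊢; omega
    · rw [show PySem.List.insertBy pvBefore x (y :: ys) = y :: PySem.List.insertBy pvBefore x ys by
        simp [PySem.List.insertBy, hb]]
      refine List.Pairwise.cons ?_ (ih hys)
      intro z hz
      rcases (PySem.List.mem_insertBy pvBefore x z ys).mp hz with hz | hz
      · subst hz
        exact (pvBefore_false_iff y z).mp (by simpa using hb)
      · exact hy z hz

theorem pv_foldl_insertBy_pairwise (xs : List (Int × Int)) (acc : List (Int × Int))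
    (h : acc.Pairwise pvLe) :
    (xs.foldl (fun acc x => PySem.List.insertBy pvBefore x acc) acc).Pairwise pvLe := by
  induction xs generalizing acc with
  | nil => simpa
  | cons x xs ih => exact ih _ (pv_insertBy_pairwise x acc h)

theorem pv_sorted2_pairwise (xs : List (Int × Int)) :
    (PySem.List.sorted2 xs Prod.fst Prod.snd).Pairwise pvLe := by
  have h : PySem.List.sorted2 xs Prod.fst Prod.snd
      = xs.foldl (fun acc x => PySem.List.insertBy pvBefore x acc) [] := rfl
  rw [h]
  exact pv_foldl_insertBy_pairwise xs [] (by simp)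

-- run heads of a list relative to the previous element (proof-only mirror of B's scan)
def pvHeads (prev : Option (Int × Int)) : List (Int × Int) → List (Int × Int)
  | [] => []
  | p :: rest => if some p ≠ prev then p :: pvHeads (some p) rest else pvHeads (some p) rest

def pvStepB (d : PySem.Dict Int Int) (p : Int × Int) : PySem.Dict Int Int :=
  d.insert p.1 (d.getD p.1 0 + 1)

-- B's scan is the pvStepB-fold over the run heads
theorem pv_scan_eq_foldl_heads (l : List (Int × Int)) (prev : Option (Int × Int))
    (d : PySem.Dict Int Int) :
    pvScanB prev d l = (pvHeads prev l).foldl pvStepB d := by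
  induction l generalizing prev d with
  | nil => simp [pvScanB, pvHeads]
  | cons p rest ih =>
    by_cases hp : some p ≠ prev
    · simp only [pvScanB, pvHeads, if_pos hp, List.foldl_cons, ih]; rfl
    · simp only [pvScanB, pvHeads, if_neg hp, ih]

-- the tally dict: the count of each track among the firsts of the folded pairs
theorem pv_foldB_getD (l : List (Int × Int)) (d : PySem.Dict Int Int) (x : Int) :
    (l.foldl pvStepB d).getD x 0 = d.getD x 0 + ((l.map Prod.fst).count x : Int) := by
  have h := PySem.Dict.getD_foldl_insert_add_one (l.map Prod.fst) d x
  rw [List.foldl_map] at h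
  simpa [pvStepB] using h

-- pvLe is antisymmetric
theorem pvLe_antisymm {a b : Int × Int} (h1 : pvLe a b) (h2 : pvLe b a) : a = b := by
  obtain ⟨a1, a2⟩ := a; obtain ⟨b1, b2⟩ := b
  simp [pvLe] at h1 h2
  have : a1 = b1 ∧ a2 = b2 := by omega
  simp [this.1, this.2]

-- run heads of a sorted tail seen after q: exactly the elements other than q, once each
theorem pv_heads_spec (q : Int × Int) (l : List (Int × Int))
    (hs : l.Pairwise pvLe) (hq : ∀ a ∈ l, pvLe q a) :
    (pvHeads (some q) l).Nodup ∧ (∀ a, a ∈ pvHeads (some q) l ↔ a ∈ l ∧ a ≠ q) := by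
  induction l generalizing q with
  | nil => simp [pvHeads]
  | cons p rest ih =>
    rw [List.pairwise_cons] at hs
    obtain ⟨hp, hrest⟩ := hs
    by_cases hpq : p = q
    · subst hpq
      rw [show pvHeads (some p) (p :: rest) = pvHeads (some p) rest by simp [pvHeads]]
      obtain ⟨h1, h2⟩ := ih p hrest hp
      refine ⟨h1, fun a => ?_⟩
      rw [h2, List.mem_cons]
      constructor
      · rintro ⟨ha, hne⟩; exact ⟨Or.inr ha, hne⟩
      · rintro ⟨ha | ha, hne⟩
        · exact absurd ha hne
        · exact ⟨ha, hne⟩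
    · rw [show pvHeads (some q) (p :: rest) = p :: pvHeads (some p) rest by
        simp [pvHeads]; exact hpq]
      obtain ⟨h1, h2⟩ := ih p hrest hp
      have hqp : pvLe q p := hq p List.mem_cons_self
      refine ⟨List.nodup_cons.mpr ⟨fun hm => ((h2 p).mp hm).2 rfl, h1⟩, fun a => ?_⟩
      rw [List.mem_cons, h2, List.mem_cons]
      constructor
      · rintro (rfl | ⟨ha, hne⟩)
        · exact ⟨Or.inl rfl, hpq⟩
        · refine ⟨Or.inr ha, fun haq => ?_⟩
          subst haq
          exact hpq (pvLe_antisymm (hp a ha) hqp)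
      · rintro ⟨rfl | ha, hne⟩
        · exact Or.inl rfl
        · by_cases hap : a = p
          · exact Or.inl hap
          · exact Or.inr ⟨ha, hap⟩

-- run heads with no previous element: every element of a sorted list, once each
theorem pv_heads_none_spec (l : List (Int × Int)) (hs : l.Pairwise pvLe) :
    (pvHeads none l).Nodup ∧ (∀ a, a ∈ pvHeads none l ↔ a ∈ l) := by
  cases l with
  | nil => simp [pvHeads]
  | cons p rest =>
    rw [List.pairwise_cons] at hs
    obtain ⟨hp, hrest⟩ := hs
    rw [show pvHeads none (p :: rest) = p :: pvHeads (some p) rest by simp [pvHeads]]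
    obtain ⟨h1, h2⟩ := pv_heads_spec p rest hrest hp
    refine ⟨List.nodup_cons.mpr ⟨fun hm => ((h2 p).mp hm).2 rfl, h1⟩, fun a => ?_⟩
    rw [List.mem_cons, h2, List.mem_cons]
    constructor
    · rintro (rfl | ⟨ha, _⟩)
      · exact Or.inl rfl
      · exact Or.inr ha
    · rintro (rfl | ha)
      · exact Or.inl rfl
      · by_cases hap : a = p
        · exact Or.inl hap
        · exact Or.inr ⟨ha, hap⟩

-- the run heads of the sorted pairs are a permutation of the distinct pairs
theorem pv_heads_perm_set (ps : List (Int × Int)) :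
    (pvHeads none (PySem.List.sorted2 ps Prod.fst Prod.snd)).Perm (PySem.Set.ofList ps) := by
  obtain ⟨h1, h2⟩ := pv_heads_none_spec _ (pv_sorted2_pairwise ps)
  rw [List.perm_ext_iff_of_nodup h1 (PySem.Set.nodup_ofList ps)]
  intro a
  rw [h2, PySem.Set.mem_ofList]
  exact (PySem.List.sorted2_perm ps Prod.fst Prod.snd false).mem_iff

theorem pv_main (labels vlm_predicted : List Int)
    (h : ∀ x ∈ labels, x ∈ (labels.zip vlm_predicted).map Prod.fst) :
    number_hits_different_module labels vlm_predicted
      = number_hits_different_module_alt labels vlm_predicted := by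
  unfold number_hits_different_module number_hits_different_module_alt
  apply List.map_congr_left
  intro x hx
  have hxf := h x hx
  -- A's value at x
  have hA := pv_foldA_get? (labels.zip vlm_predicted) x
  rw [if_pos hxf] at hA
  rw [PySem.Dict.getD_of_get?_eq_some _ _ hA]
  -- B's value at x
  rw [pv_scan_eq_foldl_heads, pv_foldB_getD, PySem.Dict.getD_empty]
  have hcnt : ((pvHeads none (PySem.List.sorted2 (labels.zip vlm_predicted) Prod.fst Prod.snd)).map
        Prod.fst).count x
      = ((PySem.Set.ofList (labels.zip vlm_predicted) : List (Int × Int)).map Prod.fst).count x :=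
    ((pv_heads_perm_set (labels.zip vlm_predicted)).map Prod.fst).count_eq x
  rw [hcnt, ← pv_count_bridge (labels.zip vlm_predicted) x]
  simp [PySem.Set.len]

-- ===== VERDICT (by name: the statement is the Claim_ definition above) =====
theorem number_hits_different_module_spec : Claim_equal_number_hits_different_module := by
  intro labels vlm_predicted _ hpre
  unfold Spec_number_hits_different_module
  apply pv_main
  intro x hx
  rw [List.map_fst_zip (le_of_eq hpre)]
  exact hx
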